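-- pv_equiv track=rewrite | github.com/hzy-hits/-zzz-autopilot- | src/zzz_agent/intervention/patches.py | _is_unknown_screen
-- ===== SOURCE A (Python) =====
-- def _is_unknown_screen(status: object, screen_unknown_status: str | None) -> bool:
--     status_text = str(status or "").strip().lower()
--     if not status_text:
--         return False
--
--     markers = {
--         str(screen_unknown_status or "").strip().lower(),
--         "screen_unknown",
--         "unknown screen",
--         "unknown",
--         "未知画面",
--         "未能识别当前画面",
--     }
--     markers.discard("")
--     return any(marker in status_text for marker in markers)
-- ===== SOURCE B (Python) =====
-- def _is_unknown_screen(status, screen_unknown_status):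
--     # Single-pass streaming multi-pattern matcher: instead of testing each
--     # marker against the whole text, scan the text once, maintaining the set
--     # of partially-matched marker remainders (an active-match state machine).
--     status_text = str(status or "").strip().lower()
--     if not status_text:
--         return False
--     markers = {
--         str(screen_unknown_status or "").strip().lower(),
--         "screen_unknown",
--         "unknown screen",
--         "unknown",
--         "未知画面",
--         "未能识别当前画面",
--     }
--     markers.discard("")
--     markers = list(markers)
--     pending = []
--     for ch in status_text:
--         pending = [rem[1:] for rem in pending + markers if rem and rem[0] == ch]
--         if "" in pending:
--             return True
--     return False
-- ===== Notes on version B (the rewrite author's own statement) =====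
-- stated objective: alternative
-- what changed: B replaces the per-marker whole-text substring loop (any(marker in text)) by a single left-to-right scan of the text that maintains the set of partially-matched marker remainders (a streaming active-match state machine), reporting a match when a remainder is fully consumed.
import Mathlib
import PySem

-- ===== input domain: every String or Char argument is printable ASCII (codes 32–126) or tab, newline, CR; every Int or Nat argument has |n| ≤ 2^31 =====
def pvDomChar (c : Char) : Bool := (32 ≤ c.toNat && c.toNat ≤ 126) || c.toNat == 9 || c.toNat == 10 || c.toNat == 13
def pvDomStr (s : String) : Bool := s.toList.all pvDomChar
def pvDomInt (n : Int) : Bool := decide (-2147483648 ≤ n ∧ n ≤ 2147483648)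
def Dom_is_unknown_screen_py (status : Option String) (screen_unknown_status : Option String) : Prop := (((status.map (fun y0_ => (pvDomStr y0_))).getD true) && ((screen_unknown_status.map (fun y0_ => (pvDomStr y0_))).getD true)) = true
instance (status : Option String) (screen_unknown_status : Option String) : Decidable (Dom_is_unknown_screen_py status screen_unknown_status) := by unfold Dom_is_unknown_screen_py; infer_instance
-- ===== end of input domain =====

-- B replaces A's per-marker whole-text substring loop by a single left-to-right scan of the
-- text maintaining the active partially-matched marker remainders (same cost, alternative).

-- ===== PORT A =====
def is_unknown_screen_py (status : Option String) (screen_unknown_status : Option String) : Bool :=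
  let status_text := PySem.Str.lower (PySem.Str.strip (status.getD ""))
  if status_text = "" then false
  else
    let markers : PySem.Set String := PySem.Set.ofList
      [PySem.Str.lower (PySem.Str.strip (screen_unknown_status.getD "")),
       "screen_unknown", "unknown screen", "unknown", "未知画面", "未能识别当前画面"]
    let markers := PySem.Set.discard markers ""
    markers.any (fun marker => PySem.Str.isIn marker status_text)

-- ===== PORT B =====
-- one loop iteration of Source B: filter/advance the pending remainders against markers, record a
-- completed match in the Bool (Source B returns early; the flag, once true, is carried unchanged,
-- which yields the same result)
def pvStepB (markers : List (List Char)) (st : Bool × List (List Char)) (ch : Char) :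
    Bool × List (List Char) :=
  let pending := (st.2 ++ markers).filterMap
    (fun rem => match rem with
      | [] => none
      | x :: xs => if x = ch then some xs else none)
  (st.1 || pending.contains [], pending)

def is_unknown_screen_py_alt (status : Option String) (screen_unknown_status : Option String) : Bool :=
  let status_text := PySem.Str.lower (PySem.Str.strip (status.getD ""))
  if status_text = "" then false
  else
    let markers : PySem.Set String := PySem.Set.ofList
      [PySem.Str.lower (PySem.Str.strip (screen_unknown_status.getD "")),
       "screen_unknown", "unknown screen", "unknown", "未知画面", "未能识别当前画面"]
    let markersL := (PySem.Set.discard markers "").map String.toList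
    (status_text.toList.foldl (pvStepB markersL) (false, [])).1

-- ===== PRECONDITION & SPEC =====
def Spec_is_unknown_screen_py (status : Option String) (screen_unknown_status : Option String) (out : Bool) : Prop := out = is_unknown_screen_py_alt status screen_unknown_status
instance (status : Option String) (screen_unknown_status : Option String) (out : Bool) : Decidable (Spec_is_unknown_screen_py status screen_unknown_status out) := by unfold Spec_is_unknown_screen_py; infer_instance

-- ===== CLAIM (what is proved, stated in full; the proofs are below) =====
def Claim_equal_is_unknown_screen_py : Prop := ∀ (status : Option String) (screen_unknown_status : Option String), Dom_is_unknown_screen_py status screen_unknown_status → Spec_is_unknown_screen_py status screen_unknown_status (is_unknown_screen_py status screen_unknown_status)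

-- ===== LEMMAS AND PROOFS =====

-- membership in the advanced pending list
lemma mem_stepB_pending (l : List (List Char)) (ch : Char) (r' : List Char) :
    r' ∈ l.filterMap (fun rem => match rem with
      | [] => none
      | x :: xs => if x = ch then some xs else none) ↔ (ch :: r') ∈ l := by
  rw [List.mem_filterMap]
  constructor
  · rintro ⟨a, ha, hfa⟩
    rcases a with _ | ⟨x, xs⟩
    · simp at hfa
    · have hfa' : (if x = ch then some xs else none) = some r' := hfa
      split_ifs at hfa' with hx
      injection hfa' with h2
      subst h2; subst hx; exact ha
  · intro h
    refine ⟨ch :: r', h, ?_⟩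
    simp

-- a nonempty prefix of ch :: ts starts with ch
lemma ne_nil_prefix_cons {r : List Char} {ch : Char} {ts : List Char} :
    (r ≠ [] ∧ r <+: ch :: ts) ↔ ∃ r', r = ch :: r' ∧ r' <+: ts := by
  cases r with
  | nil => simp
  | cons x xs =>
    simp only [ne_eq, reduceCtorEq, not_false_eq_true, true_and, List.cons_prefix_cons]
    constructor
    · rintro ⟨rfl, h⟩; exact ⟨xs, rfl, h⟩
    · rintro ⟨r', h, hp⟩; cases h; exact ⟨rfl, hp⟩

-- invariant of B's scan: the flag ends true iff some pending remainder is a nonempty prefix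
-- of the rest of the text, or some marker occurs in the rest of the text
lemma scan_iff (markers : List (List Char)) (hm : [] ∉ markers) :
    ∀ (t : List Char) (found : Bool) (pending : List (List Char)),
    (t.foldl (pvStepB markers) (found, pending)).1 = true ↔
      (found = true ∨ (∃ r ∈ pending, r ≠ [] ∧ r <+: t) ∨ (∃ m ∈ markers, m <:+: t)) := by
  intro t
  induction t with
  | nil =>
    intro found pending
    simp only [List.foldl_nil]
    constructor
    · intro hf; exact Or.inl hf
    · rintro (hf | ⟨r, _, hne, hp⟩ | ⟨m, hmem, hinf⟩)
      · exact hf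
      · exact absurd (List.prefix_nil.mp hp) hne
      · exact absurd (List.infix_nil.mp hinf ▸ hmem) hm
  | cons ch ts ih =>
    intro found pending
    rw [List.foldl_cons]
    show (ts.foldl (pvStepB markers) (pvStepB markers (found, pending) ch)).1 = true ↔ _
    rw [ih]
    simp only [pvStepB, Bool.or_eq_true, List.contains_eq_mem, decide_eq_true_eq,
      mem_stepB_pending]
    constructor
    · rintro ((hf | hc) | ⟨r', hr', hne, hp⟩ | ⟨m, hmem, hinf⟩)
      · exact Or.inl hf
      · rcases List.mem_append.mp hc with hc | hc
        · exact Or.inr (Or.inl ⟨[ch], hc, by simp⟩)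
        · exact Or.inr (Or.inr ⟨[ch], hc, ⟨[], ts, by simp⟩⟩)
      · rcases List.mem_append.mp hr' with hr' | hr'
        · exact Or.inr (Or.inl ⟨ch :: r', hr', by simp, List.cons_prefix_cons.mpr ⟨rfl, hp⟩⟩)
        · exact Or.inr (Or.inr ⟨ch :: r', hr', (List.cons_prefix_cons.mpr ⟨rfl, hp⟩).isInfix⟩)
      · exact Or.inr (Or.inr ⟨m, hmem, hinf.trans (List.suffix_cons ch ts).isInfix⟩)
    · rintro (hf | ⟨r, hr, hne, hp⟩ | ⟨m, hmem, hinf⟩)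
      · exact Or.inl (Or.inl hf)
      · obtain ⟨r', rfl, hp'⟩ := ne_nil_prefix_cons.mp ⟨hne, hp⟩
        cases r' with
        | nil => exact Or.inl (Or.inr (List.mem_append.mpr (Or.inl hr)))
        | cons y ys =>
          exact Or.inr (Or.inl ⟨y :: ys, List.mem_append.mpr (Or.inl hr), by simp, hp'⟩)
      · rcases List.infix_cons_iff.mp hinf with hpm | hinf'
        · have hnem : m ≠ [] := fun h => hm (h ▸ hmem)
          obtain ⟨m', rfl, hp'⟩ := ne_nil_prefix_cons.mp ⟨hnem, hpm⟩
          cases m' with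
          | nil => exact Or.inl (Or.inr (List.mem_append.mpr (Or.inr hmem)))
          | cons y ys =>
            exact Or.inr (Or.inl ⟨y :: ys, List.mem_append.mpr (Or.inr hmem), by simp, hp'⟩)
        · exact Or.inr (Or.inr ⟨m, hmem, hinf'⟩)

-- A's any-loop over the markers equals B's scan result
lemma any_eq_scan (t : String) (markers : PySem.Set String) (hne : "" ∉ markers) :
    markers.any (fun marker => PySem.Str.isIn marker t)
      = (t.toList.foldl (pvStepB (markers.map String.toList)) (false, [])).1 := by
  have hnil : ([] : List Char) ∉ markers.map String.toList := by
    intro h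
    obtain ⟨m, hmmem, hml⟩ := List.mem_map.mp h
    have hme : m = "" := by
      simp [← String.toList_inj, hml]
    exact hne (hme ▸ hmmem)
  rw [Bool.eq_iff_iff, scan_iff _ hnil]
  simp only [List.any_eq_true, PySem.Str.isIn_iff_infix, List.mem_map]
  constructor
  · rintro ⟨m, hmmem, hinf⟩
    exact Or.inr (Or.inr ⟨m.toList, ⟨m, hmmem, rfl⟩, hinf⟩)
  · rintro (hf | ⟨r, hr, _, _⟩ | ⟨ml, ⟨m, hmmem, rfl⟩, hinf⟩)
    · exact absurd hf Bool.false_ne_true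
    · exact absurd hr (List.not_mem_nil)
    · exact ⟨m, hmmem, hinf⟩

-- ===== VERDICT (by name: the statement is the Claim_ definition above) =====
theorem is_unknown_screen_py_spec : Claim_equal_is_unknown_screen_py := by
  intro status screen_unknown_status _
  unfold Spec_is_unknown_screen_py is_unknown_screen_py is_unknown_screen_py_alt
  by_cases h : PySem.Str.lower (PySem.Str.strip (status.getD "")) = ""
  · simp [h]
  · simp only [h, if_false]
    exact any_eq_scan _ _ (by
      intro hmem
      exact absurd ((PySem.Set.mem_discard _ _ _).mp hmem).2 (by simp))
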